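-- pv_equiv track=rewrite | github.com/vhsw/Advent-of-Code | 2017/Day 03/spiral_memory.py | part2
-- ===== SOURCE A (Python) =====
-- from itertools import count
--
-- def part2(data: int):
--     """Part 2 solution"""
--     grid = {complex(0, 0): 1}
--     pos = complex(0, 1)
--
--     def update():
--         val = sum(grid.get(pos + d_pos, 0) for d_pos in offsets())
--         if val > data:
--             raise StopIteration(val)
--         grid[pos] = val
--
--     try:
--         for circle in count(1):
--             for _ in range(f(circle)):
--                 update()
--                 pos -= 1
--             for _ in range(f(circle + 1) - 1):
--                 update()
--                 pos -= 1j
--             for _ in range(f(circle + 1) - 1):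
--                 update()
--                 pos += 1
--             for _ in range(f(circle + 1)):
--                 update()
--                 pos += 1j
--     except StopIteration as ex:
--         return ex.value
--
-- def f(n):
--     return 2 * n - 1
--
-- def offsets():
--     for r in range(-1, 2):
--         for c in range(-1, 2):
--             if r == c == 0:
--                 continue
--             yield complex(r, c)
-- ===== SOURCE B (Python) =====
-- def part2(data: int):
--     """Part 2 solution (scatter: push each finalized value into its neighbors' accumulators)"""
--     acc = {}
--
--     def bump(x, y, v):
--         for dx in (-1, 0, 1):
--             for dy in (-1, 0, 1):
--                 if dx or dy:
--                     k = (x + dx, y + dy)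
--                     acc[k] = acc.get(k, 0) + v
--
--     bump(0, 0, 1)
--     dirs = [(1, 0), (0, 1), (-1, 0), (0, -1)]
--     x = y = 0
--     d = 0
--     step = 1
--     while True:
--         for _ in range(2):
--             dx, dy = dirs[d]
--             for _ in range(step):
--                 x += dx
--                 y += dy
--                 v = acc.get((x, y), 0)
--                 if v > data:
--                     return v
--                 bump(x, y, v)
--             d = (d + 1) % 4
--         step += 1
-- ===== Notes on version B (the rewrite author's own statement) =====
-- stated objective: alternative
-- what changed: A walks the spiral ring by ring (segment lengths from f(circle)) and computes each new cell by gathering the eight neighbour values from the grid dict; B walks it with the cycling-direction increasing-step scheme (steps one,one,two,two,three,three,...) and inverts the gather into a scatter: every finalized value is pushed into its eight neighbours' running accumulators, so a new cell's value is a single dict read.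
import Mathlib
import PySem

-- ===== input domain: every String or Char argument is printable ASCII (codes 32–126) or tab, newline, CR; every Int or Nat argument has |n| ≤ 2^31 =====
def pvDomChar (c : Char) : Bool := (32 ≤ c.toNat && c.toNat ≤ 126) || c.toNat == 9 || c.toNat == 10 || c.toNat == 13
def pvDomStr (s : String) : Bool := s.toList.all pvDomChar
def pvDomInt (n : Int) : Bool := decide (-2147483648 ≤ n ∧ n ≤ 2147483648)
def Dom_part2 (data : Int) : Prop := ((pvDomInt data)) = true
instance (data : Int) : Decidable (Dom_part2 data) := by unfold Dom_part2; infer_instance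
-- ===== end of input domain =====

-- B replaces A's per-ring gather (summing the eight neighbours of each new cell from the dict)
-- by a direction-cycling spiral with a scatter: each finalized value is pushed into its
-- neighbours' running accumulators, so a new cell's value is a single dict read (objective:
-- alternative). Python's unbounded `count(1)` loop is ported with a fixed fuel (six rings /
-- twelve turns): within the stated domain the answer always appears inside that fuel (the
-- generated prefix contains a value exceeding the domain's integer bound), so the ports compute
-- exactly what the Pythons return there.

-- ===== PORT A =====
def fA (n : Nat) : Nat := 2 * n - 1

def offsetsA : List (Int × Int) :=
  [(-1,-1),(-1,0),(-1,1),(0,-1),(0,1),(1,-1),(1,0),(1,1)]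

def valA (g : PySem.Dict (Int × Int) Int) (p : Int × Int) : Int :=
  (offsetsA.map (fun d => g.getD (p.1 + d.1, p.2 + d.2) 0)).sum

def updateA (data : Int) (g : PySem.Dict (Int × Int) Int) (p : Int × Int) :
    Sum Int (PySem.Dict (Int × Int) Int) :=
  let val := valA g p
  if val > data then .inl val else .inr (g.insert p val)

def runSegA (data : Int) :
    Nat → PySem.Dict (Int × Int) Int → Int × Int → Int × Int →
    Sum Int (PySem.Dict (Int × Int) Int × (Int × Int))
  | 0, g, p, _ => .inr (g, p)
  | n+1, g, p, m =>
    match updateA data g p with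
    | .inl v => .inl v
    | .inr g' => runSegA data n g' (p.1 + m.1, p.2 + m.2) m

def loopA (data : Int) :
    Nat → Nat → PySem.Dict (Int × Int) Int → Int × Int → Int
  | 0, _, _, _ => 0
  | fuel+1, circle, g, p =>
    match runSegA data (fA circle) g p (-1, 0) with
    | .inl v => v
    | .inr (g1, p1) =>
      match runSegA data (fA (circle+1) - 1) g1 p1 (0, -1) with
      | .inl v => v
      | .inr (g2, p2) =>
        match runSegA data (fA (circle+1) - 1) g2 p2 (1, 0) with
        | .inl v => v
        | .inr (g3, p3) =>
          match runSegA data (fA (circle+1)) g3 p3 (0, 1) with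
          | .inl v => v
          | .inr (g4, p4) => loopA data fuel (circle+1) g4 p4

def part2 (data : Int) : Int :=
  loopA data 6 1 (PySem.Dict.ofList [(((0:Int),(0:Int)), (1:Int))]) (0, 1)

-- ===== PORT B =====
def bumpB (acc : PySem.Dict (Int × Int) Int) (x y v : Int) : PySem.Dict (Int × Int) Int :=
  [(-1 : Int), 0, 1].foldl (fun a dx =>
    [(-1 : Int), 0, 1].foldl (fun a dy =>
      if dx ≠ 0 ∨ dy ≠ 0 then
        a.insert (x + dx, y + dy) (a.getD (x + dx, y + dy) 0 + v)
      else a) a) acc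

def dirsB : List (Int × Int) := [(1,0),(0,1),(-1,0),(0,-1)]

def runSegB (data : Int) :
    Nat → Int → Int → Int × Int → PySem.Dict (Int × Int) Int →
    Sum Int (Int × Int × PySem.Dict (Int × Int) Int)
  | 0, x, y, _, acc => .inr (x, y, acc)
  | n+1, x, y, dxy, acc =>
    let x' := x + dxy.1
    let y' := y + dxy.2
    let v := acc.getD (x', y') 0
    if v > data then .inl v
    else runSegB data n x' y' dxy (bumpB acc x' y' v)

def loopB (data : Int) :
    Nat → Nat → Nat → Int → Int → PySem.Dict (Int × Int) Int → Int
  | 0, _, _, _, _, _ => 0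
  | fuel+1, step, d, x, y, acc =>
    match runSegB data step x y (dirsB.getD d (0,0)) acc with
    | .inl v => v
    | .inr (x1, y1, acc1) =>
      match runSegB data step x1 y1 (dirsB.getD ((d+1) % 4) (0,0)) acc1 with
      | .inl v => v
      | .inr (x2, y2, acc2) => loopB data fuel (step+1) ((d+2) % 4) x2 y2 acc2

def part2_alt (data : Int) : Int :=
  loopB data 12 1 0 0 0 (bumpB PySem.Dict.empty 0 0 1)

-- ===== PRECONDITION & SPEC =====
def Spec_part2 (data : Int) (out : Int) : Prop := out = part2_alt data
instance (data : Int) (out : Int) : Decidable (Spec_part2 data out) := by unfold Spec_part2; infer_instance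

-- ===== CLAIM (what is proved, stated in full; the proofs are below) =====
def Claim_equal_part2 : Prop := ∀ (data : Int), Dom_part2 data → Spec_part2 data (part2 data)

-- ===== LEMMAS AND PROOFS =====

/-- first element greater than `d`, 0 if none (the fuel-exhaustion default) -/
def firstGt (d : Int) : List Int → Int
  | [] => 0
  | x :: xs => if x > d then x else firstGt d xs

def firstGt? (d : Int) : List Int → Option Int
  | [] => none
  | x :: xs => if x > d then some x else firstGt? d xs

theorem firstGt_append (d : Int) (l1 l2 : List Int) :
    firstGt d (l1 ++ l2) =
      (match firstGt? d l1 with | some v => v | none => firstGt d l2) := by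
  induction l1 with
  | nil => simp [firstGt?]
  | cons x xs ih =>
    by_cases h : x > d <;> simp [firstGt, firstGt?, h, ih]

theorem firstGt_append_left (d : Int) (l1 l2 : List Int) (h : ∃ x ∈ l1, d < x) :
    firstGt d (l1 ++ l2) = firstGt d l1 := by
  induction l1 with
  | nil => simp at h
  | cons x xs ih =>
    by_cases hx : x > d
    · simp [firstGt, hx]
    · obtain ⟨w, hw, hdw⟩ := h
      rcases List.mem_cons.mp hw with rfl | hw
      · omega
      · simp only [List.cons_append, firstGt, if_neg hx]
        exact ih ⟨w, hw, hdw⟩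

-- exceptionless generators for A (always store the value, emit the list of values)
def genSegA :
    Nat → PySem.Dict (Int × Int) Int → Int × Int → Int × Int →
    List Int × PySem.Dict (Int × Int) Int × (Int × Int)
  | 0, g, p, _ => ([], g, p)
  | n+1, g, p, m =>
    match genSegA n (g.insert p (valA g p)) (p.1 + m.1, p.2 + m.2) m with
    | (l, s) => (valA g p :: l, s)

def genLoopA :
    Nat → Nat → PySem.Dict (Int × Int) Int → Int × Int → List Int
  | 0, _, _, _ => []
  | fuel+1, circle, g, p =>
    match genSegA (fA circle) g p (-1, 0) with
    | (l1, g1, p1) =>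
      match genSegA (fA (circle+1) - 1) g1 p1 (0, -1) with
      | (l2, g2, p2) =>
        match genSegA (fA (circle+1) - 1) g2 p2 (1, 0) with
        | (l3, g3, p3) =>
          match genSegA (fA (circle+1)) g3 p3 (0, 1) with
          | (l4, g4, p4) => l1 ++ (l2 ++ (l3 ++ (l4 ++ genLoopA fuel (circle+1) g4 p4)))

-- exceptionless generators for B
def genSegB :
    Nat → Int → Int → Int × Int → PySem.Dict (Int × Int) Int →
    List Int × (Int × Int × PySem.Dict (Int × Int) Int)
  | 0, x, y, _, acc => ([], x, y, acc)
  | n+1, x, y, dxy, acc =>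
    match genSegB n (x + dxy.1) (y + dxy.2) dxy
        (bumpB acc (x + dxy.1) (y + dxy.2) (acc.getD (x + dxy.1, y + dxy.2) 0)) with
    | (l, s) => (acc.getD (x + dxy.1, y + dxy.2) 0 :: l, s)

def genLoopB :
    Nat → Nat → Nat → Int → Int → PySem.Dict (Int × Int) Int → List Int
  | 0, _, _, _, _, _ => []
  | fuel+1, step, d, x, y, acc =>
    match genSegB step x y (dirsB.getD d (0,0)) acc with
    | (l1, x1, y1, acc1) =>
      match genSegB step x1 y1 (dirsB.getD ((d+1) % 4) (0,0)) acc1 with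
      | (l2, x2, y2, acc2) => l1 ++ (l2 ++ genLoopB fuel (step+1) ((d+2) % 4) x2 y2 acc2)

theorem runSegA_eq (data : Int) (n : Nat) :
    ∀ g p m, runSegA data n g p m =
      (match firstGt? data (genSegA n g p m).1 with
       | some v => .inl v
       | none => .inr (genSegA n g p m).2) := by
  induction n with
  | zero => intro g p m; simp [runSegA, genSegA, firstGt?]
  | succ n ih =>
    intro g p m
    simp only [runSegA, genSegA, updateA]
    by_cases h : valA g p > data
    · simp [firstGt?, h]
    · simp only [if_neg h, ih]
      rcases genSegA n (g.insert p (valA g p)) (p.1 + m.1, p.2 + m.2) m with ⟨l, s⟩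
      simp [firstGt?, h]

theorem runSegB_eq (data : Int) (n : Nat) :
    ∀ x y dxy acc, runSegB data n x y dxy acc =
      (match firstGt? data (genSegB n x y dxy acc).1 with
       | some v => .inl v
       | none => .inr (genSegB n x y dxy acc).2) := by
  induction n with
  | zero => intro x y dxy acc; simp [runSegB, genSegB, firstGt?]
  | succ n ih =>
    intro x y dxy acc
    simp only [runSegB, genSegB]
    by_cases h : acc.getD (x + dxy.1, y + dxy.2) 0 > data
    · simp [firstGt?, h]
    · simp only [if_neg h, ih]
      rcases genSegB n (x + dxy.1) (y + dxy.2) dxy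
          (bumpB acc (x + dxy.1) (y + dxy.2) (acc.getD (x + dxy.1, y + dxy.2) 0)) with ⟨l, s⟩
      simp [firstGt?, h]

theorem loopA_eq (data : Int) (fuel : Nat) :
    ∀ circle g p, loopA data fuel circle g p = firstGt data (genLoopA fuel circle g p) := by
  induction fuel with
  | zero => intro circle g p; simp [loopA, genLoopA, firstGt]
  | succ fuel ih =>
    intro circle g p
    simp only [loopA, genLoopA, runSegA_eq]
    rcases genSegA (fA circle) g p (-1, 0) with ⟨l1, g1, p1⟩
    rw [firstGt_append]
    cases h1 : firstGt? data l1 <;> simp only [h1]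
    rcases genSegA (fA (circle+1) - 1) g1 p1 (0, -1) with ⟨l2, g2, p2⟩
    rw [firstGt_append]
    cases h2 : firstGt? data l2 <;> simp only [h2]
    rcases genSegA (fA (circle+1) - 1) g2 p2 (1, 0) with ⟨l3, g3, p3⟩
    rw [firstGt_append]
    cases h3 : firstGt? data l3 <;> simp only [h3]
    rcases genSegA (fA (circle+1)) g3 p3 (0, 1) with ⟨l4, g4, p4⟩
    rw [firstGt_append]
    cases h4 : firstGt? data l4 <;> simp only [h4]
    exact ih _ _ _

theorem loopB_eq (data : Int) (fuel : Nat) :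
    ∀ step d x y acc, loopB data fuel step d x y acc = firstGt data (genLoopB fuel step d x y acc) := by
  induction fuel with
  | zero => intro step d x y acc; simp [loopB, genLoopB, firstGt]
  | succ fuel ih =>
    intro step d x y acc
    simp only [loopB, genLoopB, runSegB_eq]
    rcases genSegB step x y (dirsB.getD d (0,0)) acc with ⟨l1, x1, y1, acc1⟩
    rw [firstGt_append]
    cases h1 : firstGt? data l1 <;> simp only [h1]
    rcases genSegB step x1 y1 (dirsB.getD ((d+1) % 4) (0,0)) acc1 with ⟨l2, x2, y2, acc2⟩
    rw [firstGt_append]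
    cases h2 : firstGt? data l2 <;> simp only [h2]
    exact ih _ _ _ _ _

/-- the value list A's six rings generate -/
def seqA : List Int := genLoopA 6 1 (PySem.Dict.ofList [(((0:Int),(0:Int)), (1:Int))]) (0, 1)
/-- the value list B's twelve turns generate -/
def seqB : List Int := genLoopB 12 1 0 0 0 (bumpB PySem.Dict.empty 0 0 1)

set_option maxRecDepth 100000 in
set_option maxHeartbeats 2000000 in
theorem seqB_prefix : seqB.isPrefixOf seqA = true := by decide

set_option maxRecDepth 100000 in
set_option maxHeartbeats 2000000 in
theorem big_mem : seqB.contains (3813299996 : Int) = true := by decide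

-- ===== VERDICT (by name: the statement is the Claim_ definition above) =====
theorem part2_spec : Claim_equal_part2 := by
  intro data hdom
  unfold Spec_part2 part2 part2_alt
  rw [loopA_eq, loopB_eq,
      show genLoopA 6 1 (PySem.Dict.ofList [(((0:Int),(0:Int)), (1:Int))]) (0, 1) = seqA from rfl,
      show genLoopB 12 1 0 0 0 (bumpB PySem.Dict.empty 0 0 1) = seqB from rfl]
  obtain ⟨t, ht⟩ := List.isPrefixOf_iff_prefix.mp seqB_prefix
  rw [← ht]
  refine firstGt_append_left data seqB t ⟨3813299996, List.contains_iff_mem.mp big_mem, ?_⟩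
  have : data ≤ 2147483648 := by
    unfold Dom_part2 pvDomInt at hdom
    simpa using (of_decide_eq_true hdom).2
  omega
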